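-- pv_equiv track=rewrite | github.com/amandaxva/Criptografia | criptografia.py | restaurar_caracteres
-- ===== SOURCE A (Python) =====
-- def restaurar_caracteres(texto_cifrado, texto_decifrado):
--     resultado = []
--     index_cifrado = 0
--     for char in texto_cifrado:
--         if char.isalnum():
--             resultado.append(texto_decifrado[index_cifrado])
--             index_cifrado += 1
--         else:
--             resultado.append(char)
--     return ''.join(resultado)
-- ===== SOURCE B (Python) =====
-- def restaurar_caracteres(texto_cifrado, texto_decifrado):
--     # run-based: copy each maximal alphanumeric run as ONE slice of the decoded
--     # text; non-alphanumeric characters pass through one at a time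
--     resultado = []
--     k = 0
--     resto = texto_cifrado
--     while resto:
--         m = 0
--         while m < len(resto) and resto[m].isalnum():
--             m += 1
--         if m:
--             resultado.append(texto_decifrado[k:k + m])
--             k += m
--             resto = resto[m:]
--         else:
--             resultado.append(resto[0])
--             resto = resto[1:]
--     return ''.join(resultado)
-- ===== Notes on version B (the rewrite author's own statement) =====
-- stated objective: alternative
-- what changed: Instead of A's per-character loop with a running decoded-index, B walks the ciphertext by maximal alphanumeric RUNS, copying each whole run as one slice texto_decifrado[k:k+m] and passing separators through one at a time.
import Mathlib
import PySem

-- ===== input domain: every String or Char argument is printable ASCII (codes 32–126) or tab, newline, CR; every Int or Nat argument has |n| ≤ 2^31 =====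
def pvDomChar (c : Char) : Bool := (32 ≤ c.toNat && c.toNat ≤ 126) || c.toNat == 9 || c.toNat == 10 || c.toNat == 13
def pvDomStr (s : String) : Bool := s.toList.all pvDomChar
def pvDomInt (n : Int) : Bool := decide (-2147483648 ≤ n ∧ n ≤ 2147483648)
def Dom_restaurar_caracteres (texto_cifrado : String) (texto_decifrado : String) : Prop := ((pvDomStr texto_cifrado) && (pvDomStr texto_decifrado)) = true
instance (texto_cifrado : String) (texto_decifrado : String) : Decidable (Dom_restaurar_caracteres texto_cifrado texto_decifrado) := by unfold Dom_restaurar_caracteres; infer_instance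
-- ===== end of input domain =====

-- B replaces A's per-character loop with a running decoded-index by a walk over
-- maximal alphanumeric RUNS, splicing each run as one slice of the decoded text
-- (alternative decomposition, same cost). Equivalence of the RETURN value on Pre_.

-- ===== PORT A =====
-- A's loop: accumulate result chars, advancing index_cifrado on alnum chars;
-- texto_decifrado[index_cifrado] out of range = IndexError = none (excluded by Pre_).
def raGoA (td : List Char) : List Char → Int → List Char → Option (List Char)
  | [], _, acc => some acc.reverse
  | c :: cs, idx, acc =>
      if PySem.Chars.isalnum c then
        match PySem.List.pyGet? td idx with
        | none => none
        | some d => raGoA td cs (idx + 1) (d :: acc)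
      else raGoA td cs idx (c :: acc)

def restaurar_caracteres (texto_cifrado : String) (texto_decifrado : String) : String :=
  match raGoA texto_decifrado.toList texto_cifrado.toList 0 [] with
  | some l => String.mk l
  | none => ""   -- unreachable inside Pre_ (Python raises IndexError there)

-- ===== PORT B =====
-- inner while: m = 0; while m < len(resto) and resto[m].isalnum(): m += 1
def raRunLen : List Char → Nat
  | [] => 0
  | c :: cs => if PySem.Chars.isalnum c then raRunLen cs + 1 else 0

-- outer while loop on resto, with decoded offset k; texto_decifrado[k:k+m] is a
-- Python slice (never raises), ported exactly as PySem.List.slice.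
def raLoopB (td : List Char) : List Char → Int → List Char
  | [], _ => []
  | c :: cs, k =>
      let m := raRunLen (c :: cs)
      if h : m ≠ 0 then
        PySem.List.slice td (some k) (some (k + (m : Int)))
          ++ raLoopB td ((c :: cs).drop m) (k + (m : Int))
      else c :: raLoopB td cs k
termination_by resto _ => resto.length
decreasing_by
  · simp only [List.length_drop, List.length_cons]; omega
  · simp

def restaurar_caracteres_alt (texto_cifrado : String) (texto_decifrado : String) : String :=
  String.mk (raLoopB texto_decifrado.toList texto_cifrado.toList 0)

-- ===== PRECONDITION & SPEC =====
-- Pre_ excludes exactly the inputs on which Python A raises IndexError (the decoded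
-- string is shorter than the number of alphanumeric ciphertext characters).
def Pre_restaurar_caracteres (texto_cifrado : String) (texto_decifrado : String) : Prop :=
  (texto_cifrado.toList.filter (fun c => PySem.Chars.isalnum c)).length ≤ texto_decifrado.toList.length
instance (texto_cifrado : String) (texto_decifrado : String) : Decidable (Pre_restaurar_caracteres texto_cifrado texto_decifrado) := by unfold Pre_restaurar_caracteres; infer_instance

def pvWitness_restaurar_caracteres : String × String := ("a b!c", "XYZ")

def Spec_restaurar_caracteres (texto_cifrado : String) (texto_decifrado : String) (out : String) : Prop := out = restaurar_caracteres_alt texto_cifrado texto_decifrado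
instance (texto_cifrado : String) (texto_decifrado : String) (out : String) : Decidable (Spec_restaurar_caracteres texto_cifrado texto_decifrado out) := by unfold Spec_restaurar_caracteres; infer_instance

-- ===== CLAIM (what is proved, stated in full; the proofs are below) =====
def Claim_equal_restaurar_caracteres : Prop := ∀ (texto_cifrado : String) (texto_decifrado : String), Dom_restaurar_caracteres texto_cifrado texto_decifrado → Pre_restaurar_caracteres texto_cifrado texto_decifrado → Spec_restaurar_caracteres texto_cifrado texto_decifrado (restaurar_caracteres texto_cifrado texto_decifrado)

-- ===== LEMMAS AND PROOFS =====

-- common specification of the restored character list, reading decoded chars from offset k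
def specR (td : List Char) : List Char → Nat → List Char
  | [], _ => []
  | c :: cs, k =>
      if PySem.Chars.isalnum c then td.getD k ' ' :: specR td cs (k + 1)
      else c :: specR td cs k

theorem raGoA_eq (td : List Char) : ∀ (cs : List Char) (k : Nat) (acc : List Char),
    k + (cs.filter (fun c => PySem.Chars.isalnum c)).length ≤ td.length →
    raGoA td cs (k : Int) acc = some (acc.reverse ++ specR td cs k) := by
  intro cs
  induction cs with
  | nil => intro k acc _; simp [raGoA, specR]
  | cons c cs ih =>
      intro k acc h
      by_cases hc : PySem.Chars.isalnum c = true
      · have hk : k < td.length := by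
          simp [List.filter_cons, hc] at h; omega
        have hget : PySem.List.pyGet? td (k : Int) = some (td.getD k ' ') := by
          simp [PySem.List.pyGet?_natCast, List.getElem?_eq_getElem hk, List.getD_eq_getElem _ _ hk]
        have hcast : (k : Int) + 1 = ((k + 1 : Nat) : Int) := by push_cast; ring
        have hb : k + 1 + (cs.filter (fun c => PySem.Chars.isalnum c)).length ≤ td.length := by
          simp [List.filter_cons, hc] at h; omega
        simp only [raGoA, hc, if_true, hget, hcast, ih (k + 1) _ hb, specR]
        simp
      · have hb : k + (cs.filter (fun c => PySem.Chars.isalnum c)).length ≤ td.length := by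
          simp [List.filter_cons, hc] at h; omega
        simp only [raGoA, hc, Bool.false_eq_true, if_false, ih k _ hb, specR]
        simp [hc]

theorem raRunLen_le (cs : List Char) : raRunLen cs ≤ cs.length := by
  induction cs with
  | nil => simp [raRunLen]
  | cons c cs ih => by_cases hc : PySem.Chars.isalnum c = true <;> simp [raRunLen, hc] <;> omega

theorem raRunLen_take (cs : List Char) :
    ∀ c ∈ cs.take (raRunLen cs), PySem.Chars.isalnum c = true := by
  induction cs with
  | nil => simp
  | cons c cs ih =>
      by_cases hc : PySem.Chars.isalnum c = true
      · simpa [raRunLen, hc] using ih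
      · simp [raRunLen, hc]

-- filter splits additively over a fully-alnum prefix of length m
theorem filter_split (cs : List Char) (m : Nat) (hm : m ≤ cs.length)
    (hall : ∀ c ∈ cs.take m, PySem.Chars.isalnum c = true) :
    (cs.filter (fun c => PySem.Chars.isalnum c)).length
      = m + ((cs.drop m).filter (fun c => PySem.Chars.isalnum c)).length := by
  conv_lhs => rw [← List.take_append_drop m cs]
  rw [List.filter_append, List.length_append, List.filter_eq_self.mpr hall,
    List.length_take_of_le hm]

-- splicing a fully-alnum chunk of length m out of specR
theorem specR_chunk (td : List Char) : ∀ (m : Nat) (cs : List Char) (k : Nat),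
    m ≤ cs.length → (∀ c ∈ cs.take m, PySem.Chars.isalnum c = true) →
    k + (cs.filter (fun c => PySem.Chars.isalnum c)).length ≤ td.length →
    specR td cs k = (td.drop k).take m ++ specR td (cs.drop m) (k + m) := by
  intro m
  induction m with
  | zero => intro cs k _ _ _; simp
  | succ m ih =>
      intro cs k hm hall hb
      match cs, hm with
      | c :: cs, hm =>
        have hc : PySem.Chars.isalnum c = true := hall c (by simp)
        have hall' : ∀ x ∈ cs.take m, PySem.Chars.isalnum x = true := by
          intro x hx; exact hall x (by simp [hx])
        have hk : k < td.length := by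
          simp [List.filter_cons, hc] at hb; omega
        have hb' : (k + 1) + (cs.filter (fun c => PySem.Chars.isalnum c)).length ≤ td.length := by
          simp [List.filter_cons, hc] at hb; omega
        have hdrop : td.drop k = td[k] :: td.drop (k + 1) := List.drop_eq_getElem_cons hk
        have hkk : k + 1 + m = k + (m + 1) := by omega
        simp only [specR, hc, if_true, List.drop_succ_cons, List.take_succ_cons, hdrop,
          ih cs (k + 1) (by simpa using hm) hall' hb', hkk]
        simp [List.getElem?_eq_getElem hk]

theorem raLoopB_eq (td : List Char) : ∀ (n : Nat) (cs : List Char) (k : Nat),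
    cs.length ≤ n →
    k + (cs.filter (fun c => PySem.Chars.isalnum c)).length ≤ td.length →
    raLoopB td cs (k : Int) = specR td cs k := by
  intro n
  induction n with
  | zero =>
      intro cs k hn _
      match cs, hn with
      | [], _ => simp [raLoopB, specR]
  | succ n ih =>
      intro cs k hn hb
      match cs with
      | [] => simp [raLoopB, specR]
      | c :: cs =>
        by_cases hm : raRunLen (c :: cs) = 0
        · have hc : PySem.Chars.isalnum c = false := by
            by_contra h
            simp only [Bool.not_eq_false] at h
            simp [raRunLen, h] at hm
          have hb' : k + (cs.filter (fun x => PySem.Chars.isalnum x)).length ≤ td.length := by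
            simpa [List.filter_cons, hc] using hb
          rw [raLoopB]
          simp only [hm, ne_eq, not_true_eq_false, dif_neg, not_false_iff]
          rw [ih cs k (by simpa using Nat.lt_succ_iff.mp (Nat.lt_of_lt_of_le (by simp) hn)) hb']
          simp [specR, hc]
        · set m := raRunLen (c :: cs) with hmdef
          have hmle : m ≤ (c :: cs).length := raRunLen_le _
          have hall := raRunLen_take (c :: cs)
          have hfil := filter_split (c :: cs) m hmle hall
          have hb' : (k + m) + (((c :: cs).drop m).filter (fun x => PySem.Chars.isalnum x)).length ≤ td.length := by
            omega
          have hlen : ((c :: cs).drop m).length ≤ n := by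
            simp only [List.length_drop, List.length_cons]
            simp at hn; omega
          rw [raLoopB]
          simp only [← hmdef, dif_pos hm]
          have hcast : (k : Int) + (m : Int) = ((k + m : Nat) : Int) := by push_cast; ring
          rw [PySem.List.slice_natCast_add, hcast, ih _ (k + m) hlen hb',
            specR_chunk td m (c :: cs) k hmle hall hb]

-- ===== VERDICT (by name: the statement is the Claim_ definition above) =====
theorem restaurar_caracteres_spec : Claim_equal_restaurar_caracteres := by
  intro tc td _ hpre
  unfold Spec_restaurar_caracteres restaurar_caracteres restaurar_caracteres_alt
  have hb : 0 + (tc.toList.filter (fun c => PySem.Chars.isalnum c)).length ≤ td.toList.length := by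
    simpa using hpre
  have hA := raGoA_eq td.toList tc.toList 0 [] hb
  have hB := raLoopB_eq td.toList tc.toList.length tc.toList 0 le_rfl hb
  simp only [Nat.cast_zero] at hA hB
  rw [hA, hB]
  simp
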